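-- pv_equiv track=rewrite | github.com/BlenderCN/Learnbgame | All_In_One/io_scene_stalker_object/selector.py | create_menu_classes
-- ===== SOURCE A (Python) =====
-- def create_menu_classes(shaderList, shaderType, prefix):
--     menuClassCode = ''
--     uniqDirs = []
--     for shaderName in shaderList:
--         shaderNameSplit = shaderName.split('\\')
--         dirName = shaderNameSplit[0]
--         if len(shaderNameSplit) >= 2 and dirName not in uniqDirs:
--             uniqDirs.append(dirName)
--             menuClassCode += '''
-- class Menu_{3}_{0}(bpy.types.Menu):
--     bl_label = '{0}'
--     menusList.append('Menu_{3}_{0}')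
--
--     def draw(self, context):
--         layout = self.layout
--         for operator, shader, className in operatorsList:
--             if operator.startswith('stalker.{4}_{0}'):
--                 layout.operator(operator, text=shader.split('\\\\')[-1])
--
-- bpy.utils.register_class(Menu_{3}_{0})
-- classesMenu.append(Menu_{3}_{0})
-- '''.format(dirName, '{', '}', shaderType, prefix)
--     return menuClassCode
-- ===== SOURCE B (Python) =====
-- TEMPLATE = '''
-- class Menu_{3}_{0}(bpy.types.Menu):
--     bl_label = '{0}'
--     menusList.append('Menu_{3}_{0}')
--
--     def draw(self, context):
--         layout = self.layout
--         for operator, shader, className in operatorsList: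
--             if operator.startswith('stalker.{4}_{0}'):
--                 layout.operator(operator, text=shader.split('\\\\')[-1])
--
-- bpy.utils.register_class(Menu_{3}_{0})
-- classesMenu.append(Menu_{3}_{0})
-- '''
--
--
-- def _directory(name):
--     parts = name.split('\\')
--     return parts[0] if len(parts) >= 2 else None
--
--
-- def create_menu_classes(shaderList, shaderType, prefix):
--     # Stateless first-occurrence test: no seen-set/dict is maintained; position i
--     # contributes a block iff its directory is defined and no earlier element of
--     # the original list maps to the same directory.
--     blocks = []
--     for i, name in enumerate(shaderList):
--         d = _directory(name)
--         if d is not None and all(_directory(earlier) != d for earlier in shaderList[:i]):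
--             blocks.append(TEMPLATE.format(d, '{', '}', shaderType, prefix))
--     return ''.join(blocks)
-- ===== Notes on version B (the rewrite author's own statement) =====
-- stated objective: alternative
-- what changed: A maintains a mutable seen-list (uniqDirs) and appends code while deduplicating; B keeps no deduplication state at all: for each position it applies a stateless first-occurrence test (emit the block at index i iff the name qualifies and no earlier element of the original list maps to the same directory), then joins the collected blocks.
import Mathlib
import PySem

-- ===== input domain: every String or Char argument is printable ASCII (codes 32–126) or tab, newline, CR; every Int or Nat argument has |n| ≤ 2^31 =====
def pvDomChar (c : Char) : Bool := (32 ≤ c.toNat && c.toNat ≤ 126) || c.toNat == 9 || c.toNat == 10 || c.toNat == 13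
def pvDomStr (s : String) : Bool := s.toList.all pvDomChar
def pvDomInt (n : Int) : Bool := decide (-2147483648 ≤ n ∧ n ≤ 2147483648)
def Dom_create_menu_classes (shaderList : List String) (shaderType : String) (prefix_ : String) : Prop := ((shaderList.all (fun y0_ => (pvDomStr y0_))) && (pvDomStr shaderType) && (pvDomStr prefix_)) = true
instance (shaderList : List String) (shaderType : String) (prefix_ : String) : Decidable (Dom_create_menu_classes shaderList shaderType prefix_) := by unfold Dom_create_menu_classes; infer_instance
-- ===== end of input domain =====

-- B replaces A's stateful dedup loop (a mutated uniqDirs seen-list driving string concatenation)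
-- by a stateless first-occurrence test over the original list followed by a join (objective: alternative).

-- the '''…'''.format(dirName, '{', '}', shaderType, prefix) template, shared verbatim by both Pythons
def pvTemplate (d t p : String) : String :=
  "\nclass Menu_" ++ t ++ "_" ++ d ++ "(bpy.types.Menu):\n    bl_label = '" ++ d ++
  "'\n    menusList.append('Menu_" ++ t ++ "_" ++ d ++
  "')\n\n    def draw(self, context):\n        layout = self.layout\n        for operator, shader, className in operatorsList:\n            if operator.startswith('stalker." ++
  p ++ "_" ++ d ++
  "'):\n                layout.operator(operator, text=shader.split('\\\\')[-1])\n\nbpy.utils.register_class(Menu_" ++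
  t ++ "_" ++ d ++ ")\nclassesMenu.append(Menu_" ++ t ++ "_" ++ d ++ ")\n"

-- s.split('\\'); the separator is nonempty so Python's split never errors (split? is always some)
def pvSplit (s : String) : List String := (PySem.Str.split? s "\\").getD []

-- ===== PORT A =====
def create_menu_classes (shaderList : List String) (shaderType : String) (prefix_ : String) : String :=
  (shaderList.foldl (fun (st : String × List String) shaderName =>
      let shaderNameSplit := pvSplit shaderName
      let dirName := shaderNameSplit.headD ""   -- shaderNameSplit[0]; str.split never returns an empty list
      if decide (2 ≤ shaderNameSplit.length) && !(st.2.contains dirName) then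
        (st.1 ++ pvTemplate dirName shaderType prefix_, st.2 ++ [dirName])
      else st) ("", [])).1

-- ===== PORT B =====
-- Source B's _directory helper
def pvDirOf (name : String) : Option String :=
  let parts := pvSplit name
  if 2 ≤ parts.length then some (parts.headD "") else none

def create_menu_classes_alt (shaderList : List String) (shaderType : String) (prefix_ : String) : String :=
  PySem.Str.join ""
    ((PySem.List.enumerate shaderList).foldl
      (fun (blocks : List String) (iname : Int × String) =>
        match pvDirOf iname.2 with
        | some d =>
          if (PySem.List.slice shaderList none (some iname.1)).all
              (fun earlier => pvDirOf earlier != some d) then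
            blocks ++ [pvTemplate d shaderType prefix_]
          else blocks
        | none => blocks) [])

-- ===== PRECONDITION & SPEC =====
def Spec_create_menu_classes (shaderList : List String) (shaderType : String) (prefix_ : String) (out : String) : Prop := out = create_menu_classes_alt shaderList shaderType prefix_
instance (shaderList : List String) (shaderType : String) (prefix_ : String) (out : String) : Decidable (Spec_create_menu_classes shaderList shaderType prefix_ out) := by unfold Spec_create_menu_classes; infer_instance

-- ===== CLAIM (what is proved, stated in full; the proofs are below) =====
def Claim_equal_create_menu_classes : Prop := ∀ (shaderList : List String) (shaderType : String) (prefix_ : String), Dom_create_menu_classes shaderList shaderType prefix_ → Spec_create_menu_classes shaderList shaderType prefix_ (create_menu_classes shaderList shaderType prefix_)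

-- ===== LEMMAS AND PROOFS =====

-- the directory names A's loop newly appends when started with `seen` already collected
def pvNewDirs : List String → List String → List String
  | [], _ => []
  | s :: rest, seen =>
    if decide (2 ≤ (pvSplit s).length) && !(seen.contains ((pvSplit s).headD "")) then
      (pvSplit s).headD "" :: pvNewDirs rest (seen ++ [(pvSplit s).headD ""])
    else pvNewDirs rest seen

-- the directory names B selects from `l` when `pre` is the already-scanned prefix of the full list
def pvSel : List String → List String → List String
  | _, [] => []
  | pre, s :: rest =>
    match pvDirOf s with
    | some d =>
      if pre.all (fun e => pvDirOf e != some d) then d :: pvSel (pre ++ [s]) rest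
      else pvSel (pre ++ [s]) rest
    | none => pvSel (pre ++ [s]) rest

-- concatenation of the templates over a list of directory names
def pvCat (t p : String) : List String → String
  | [] => ""
  | d :: ds => pvTemplate d t p ++ pvCat t p ds

theorem pvFoldA_eq (t p : String) : ∀ (l : List String) (acc : String) (seen : List String),
    l.foldl (fun (st : String × List String) shaderName =>
      let shaderNameSplit := pvSplit shaderName
      let dirName := shaderNameSplit.headD ""
      if decide (2 ≤ shaderNameSplit.length) && !(st.2.contains dirName) then
        (st.1 ++ pvTemplate dirName t p, st.2 ++ [dirName])
      else st) (acc, seen)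
    = (acc ++ pvCat t p (pvNewDirs l seen), seen ++ pvNewDirs l seen) := by
  intro l
  induction l with
  | nil => intro acc seen; simp [pvNewDirs, pvCat]
  | cons s rest ih =>
    intro acc seen
    simp only [List.foldl_cons, pvNewDirs]
    by_cases h : (decide (2 ≤ (pvSplit s).length)
        && !(seen.contains ((pvSplit s).headD ""))) = true
    · simp only [h, if_true, ih, pvCat, String.append_assoc, List.append_assoc, List.cons_append,
        List.nil_append]
    · simp only [Bool.not_eq_true] at h
      simp only [h, Bool.false_eq_true, if_false, ih]

-- the stateful seen-list and the stateless prefix test agree when `seen` records exactly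
-- the directories occurring in the scanned prefix `pre`
theorem pvNewDirs_eq_sel : ∀ (l pre seen : List String),
    (∀ d, seen.contains d = pre.any (fun x => pvDirOf x == some d)) →
    pvNewDirs l seen = pvSel pre l := by
  intro l
  induction l with
  | nil => intro pre seen _; simp [pvNewDirs, pvSel]
  | cons s rest ih =>
    intro pre seen hinv
    simp only [pvNewDirs, pvSel]
    by_cases h2 : 2 ≤ (pvSplit s).length
    · have hd : pvDirOf s = some ((pvSplit s).headD "") := by
        simp [pvDirOf, h2]
      rw [hd]; dsimp only
      have hall : pre.all (fun e => pvDirOf e != some ((pvSplit s).headD ""))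
          = !(seen.contains ((pvSplit s).headD "")) := by
        rw [hinv]
        simp [List.all_eq_not_any_not, bne, Bool.not_not]
      rw [hall]
      by_cases hc : seen.contains ((pvSplit s).headD "") = true
      · rw [hc]
        simp only [decide_eq_true h2, Bool.not_true, Bool.and_false, Bool.false_eq_true, if_false]
        exact ih (pre ++ [s]) seen (by
          intro d
          by_cases he : (pvSplit s).headD "" = d
          · subst he
            rw [hc]
            simp [List.any_append, hd]
          · rw [hinv d]
            simp [List.any_append, hd]
            exact fun h0 => absurd h0 (by simpa using he))
      · have hcf : seen.contains ((pvSplit s).headD "") = false := by simpa using hc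
        rw [hcf]
        simp only [decide_eq_true h2, Bool.not_false, Bool.and_true, if_true]
        congr 1
        exact ih (pre ++ [s]) (seen ++ [(pvSplit s).headD ""]) (by
          intro d
          by_cases he : (pvSplit s).headD "" = d
          · subst he
            have hmem : ((pvSplit s).headD "") ∈ seen ++ [(pvSplit s).headD ""] := by simp
            simp [List.any_append, hd]
          · have hsplit : (seen ++ [(pvSplit s).headD ""]).contains d = seen.contains d := by
              simp [List.mem_append]
              exact fun h0 => absurd h0.symm (by simpa using he)
            rw [hsplit, hinv d]
            simp [List.any_append, hd]
            exact fun h0 => absurd h0 (by simpa using he))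
    · have hd : pvDirOf s = none := by simp [pvDirOf, h2]
      rw [hd]; dsimp only
      have h2f : decide (2 ≤ (pvSplit s).length) = false := by simpa using h2
      rw [h2f]
      simp only [Bool.false_and, Bool.false_eq_true, if_false]
      exact ih (pre ++ [s]) seen (by
        intro d
        rw [hinv d]
        simp [List.any_append, hd])

-- B's fold over enumerate equals the templates over pvSel, for any already-scanned prefix
theorem pvFoldB_eq (t p : String) (full : List String) :
    ∀ (l pre : List String) (acc : List String), pre ++ l = full →
    (PySem.List.enumerate l (pre.length : Int)).foldl
      (fun (blocks : List String) (iname : Int × String) =>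
        match pvDirOf iname.2 with
        | some d =>
          if (PySem.List.slice full none (some iname.1)).all
              (fun earlier => pvDirOf earlier != some d) then
            blocks ++ [pvTemplate d t p]
          else blocks
        | none => blocks) acc
    = acc ++ (pvSel pre l).map (fun d => pvTemplate d t p) := by
  intro l
  induction l with
  | nil => intro pre acc _; simp [PySem.List.enumerate_nil, pvSel]
  | cons s rest ih =>
    intro pre acc hfull
    rw [PySem.List.enumerate_cons, List.foldl_cons]
    dsimp only
    have hslice : PySem.List.slice full none (some (pre.length : Int)) = pre := by
      rw [PySem.List.slice_to_natCast, ← hfull]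
      simp
    have hstep : ((pre.length : Int) + 1) = (((pre ++ [s]).length : Nat) : Int) := by
      simp
    simp only [pvSel, hslice]
    cases hdo : pvDirOf s with
    | none =>
      dsimp only
      rw [hstep, ih (pre ++ [s]) acc (by simpa using hfull)]
    | some d =>
      dsimp only
      by_cases hall : pre.all (fun e => pvDirOf e != some d) = true
      · rw [if_pos hall, if_pos hall, hstep,
          ih (pre ++ [s]) (acc ++ [pvTemplate d t p]) (by simpa using hfull)]
        simp
      · rw [if_neg hall, if_neg hall, hstep, ih (pre ++ [s]) acc (by simpa using hfull)]

theorem pvJoin_eq (t p : String) : ∀ (ds : List String),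
    PySem.Str.join "" (ds.map (fun d => pvTemplate d t p)) = pvCat t p ds := by
  intro ds
  induction ds with
  | nil => rfl
  | cons d rest ih =>
    cases rest with
    | nil =>
      simp [pvCat, PySem.Str.join, PySem.Chars.join_singleton, String.ofList_toList]
    | cons d' rest' =>
      rw [show pvCat t p (d :: d' :: rest') = pvTemplate d t p ++ pvCat t p (d' :: rest') from rfl,
        ← ih, ← String.toList_inj]
      simp [PySem.Str.join, PySem.Chars.join_cons_cons, String.toList_append]

theorem pvCat_eq_join_map (t p : String) (ds : List String) :
    pvCat t p ds = PySem.Str.join "" (ds.map (fun d => pvTemplate d t p)) :=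
  (pvJoin_eq t p ds).symm

-- ===== VERDICT (by name: the statement is the Claim_ definition above) =====
theorem create_menu_classes_spec : Claim_equal_create_menu_classes := by
  intro shaderList shaderType prefix_ _
  unfold Spec_create_menu_classes create_menu_classes create_menu_classes_alt
  rw [pvFoldA_eq]
  dsimp only
  have hb := pvFoldB_eq shaderType prefix_ shaderList shaderList [] [] rfl
  simp only [List.length_nil, Nat.cast_zero, List.nil_append] at hb
  rw [hb, pvNewDirs_eq_sel shaderList [] [] (by intro d; simp)]
  simp [pvCat_eq_join_map]
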